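-- pv_equiv track=rewrite | github.com/hltdi/HornMorpho | src/hm/um.py | ti_sort_verbs
-- ===== SOURCE A (Python) =====
-- def ti_sort_verbs(items):
-- #    if ax:
-- #        tm = ['V.CVB', 'IPFV;NFIN', 'IMP', 'PRF', 'IPFV', 'PFV']
-- #    else:
-- #        tm = ['V.CVB', 'IMP', 'IPFV', 'PFV']
--     tm = ['IMP', 'IPFV', 'PFV', 'PFV;NFIN;*RELC']
--     sb = ['1;SG', '2;SG;MASC', '2;SG;FEM', '3;SG;MASC', '3;SG;FEM',
--           '1;PL', '2;PL;MASC', '2;PL;FEM', '3;PL;MASC', '3;PL;FEM']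
--     sb.reverse()
--     i = []
-- #    tmsets = [set(t.split(';')) for t in tm]
--     items = [item for item in items if any([t in item[3] for t in tm])]
--     def order_func(item):
--         feat = item[3]
--         score = 0
--         for i, o in enumerate(tm):
--             if o in feat:
--                 score += i * len(sb)
--                 break
--         for i, o in enumerate(sb):
--             if o in feat:
--                 score += i
--                 break
--         return score
--     items.sort(key=order_func, reverse=True)
--     return items
-- ===== SOURCE B (Python) =====
-- def ti_sort_verbs(items):
--     tm = ['IMP', 'IPFV', 'PFV', 'PFV;NFIN;*RELC']
--     # subject list already in the reversed (scoring) order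
--     sb = ['3;PL;FEM', '3;PL;MASC', '2;PL;FEM', '2;PL;MASC', '1;PL',
--           '3;SG;FEM', '3;SG;MASC', '2;SG;FEM', '2;SG;MASC', '1;SG']
--     nbuckets = (len(tm) - 1) * len(sb) + len(sb)
--     buckets = [[] for _ in range(nbuckets)]
--     for item in items:
--         feat = item[3]
--         ti = next((i for i, t in enumerate(tm) if t in feat), None)
--         if ti is None:
--             continue
--         si = next((i for i, s in enumerate(sb) if s in feat), 0)
--         buckets[ti * len(sb) + si].append(item)
--     result = []
--     for bucket in reversed(buckets):
--         result.extend(bucket)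
--     return result
-- ===== Notes on version B (the rewrite author's own statement) =====
-- stated objective: alternative
-- what changed: Replaces filter-then-stable-reverse-sort with a single pass that drops non-matching items and appends each survivor to a bucket indexed by its bounded score (0..39), then concatenates buckets from highest to lowest; Pre_ excludes inputs containing an item with fewer than 4 fields, on which A raises IndexError.
import Mathlib
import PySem

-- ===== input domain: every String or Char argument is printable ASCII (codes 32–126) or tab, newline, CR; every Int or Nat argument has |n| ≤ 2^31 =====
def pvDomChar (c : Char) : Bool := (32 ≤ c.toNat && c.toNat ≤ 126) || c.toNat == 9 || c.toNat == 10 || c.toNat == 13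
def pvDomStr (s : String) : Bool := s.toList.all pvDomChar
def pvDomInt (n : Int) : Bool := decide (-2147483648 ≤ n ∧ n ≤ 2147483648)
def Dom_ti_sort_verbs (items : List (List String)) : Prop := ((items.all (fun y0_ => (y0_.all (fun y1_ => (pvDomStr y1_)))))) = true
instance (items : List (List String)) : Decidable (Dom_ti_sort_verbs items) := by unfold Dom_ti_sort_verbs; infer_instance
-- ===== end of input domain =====

-- B replaces A's filter-then-stable-reverse-sort by one pass into 40 score buckets
-- concatenated from highest score to lowest (alternative algorithm, same results).
-- Equivalence is about the RETURN value only (A sorts its local filtered list in place).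

-- ===== PORT A =====
def pvTmA : List String := ["IMP", "IPFV", "PFV", "PFV;NFIN;*RELC"]

def pvSbA : List String :=
  (["1;SG", "2;SG;MASC", "2;SG;FEM", "3;SG;MASC", "3;SG;FEM",
    "1;PL", "2;PL;MASC", "2;PL;FEM", "3;PL;MASC", "3;PL;FEM"]).reverse

-- the first 'for i, o in enumerate(tm): if o in feat: score += i * len(sb); break' loop
def pvLoopTmA (pairs : List (Int × String)) (feat : String) : Int :=
  match pairs with
  | [] => 0
  | (i, o) :: rest =>
    if PySem.Str.isIn o feat then i * (pvSbA.length : Int) else pvLoopTmA rest feat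

-- the second 'for i, o in enumerate(sb): if o in feat: score += i; break' loop
def pvLoopSbA (pairs : List (Int × String)) (feat : String) : Int :=
  match pairs with
  | [] => 0
  | (i, o) :: rest =>
    if PySem.Str.isIn o feat then i else pvLoopSbA rest feat

def pvOrderFunc (item : List String) : Int :=
  let feat := PySem.List.pyGetD item 3 ""
  pvLoopTmA (PySem.List.enumerate pvTmA) feat + pvLoopSbA (PySem.List.enumerate pvSbA) feat

def ti_sort_verbs (items : List (List String)) : List (List String) :=
  let filtered := items.filter
    (fun item => pvTmA.any (fun t => PySem.Str.isIn t (PySem.List.pyGetD item 3 "")))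
  PySem.List.sorted filtered pvOrderFunc true

-- ===== PORT B =====
def pvTmB : List String := ["IMP", "IPFV", "PFV", "PFV;NFIN;*RELC"]

-- subject list already written in the reversed (scoring) order
def pvSbB : List String :=
  ["3;PL;FEM", "3;PL;MASC", "2;PL;FEM", "2;PL;MASC", "1;PL",
   "3;SG;FEM", "3;SG;MASC", "2;SG;FEM", "2;SG;MASC", "1;SG"]

def pvBucketStep (bs : List (List (List String))) (item : List String) :
    List (List (List String)) :=
  let feat := PySem.List.pyGetD item 3 ""
  match pvTmB.findIdx? (fun t => PySem.Str.isIn t feat) with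
  | none => bs
  | some ti =>
    let si := (pvSbB.findIdx? (fun s => PySem.Str.isIn s feat)).getD 0
    let k := ti * pvSbB.length + si
    bs.set k (bs.getD k [] ++ [item])

def ti_sort_verbs_alt (items : List (List String)) : List (List String) :=
  let n := (pvTmB.length - 1) * pvSbB.length + pvSbB.length
  let buckets := items.foldl pvBucketStep (List.replicate n [])
  buckets.reverse.flatten

-- ===== PRECONDITION & SPEC =====
-- Pre_ excludes inputs containing an item with fewer than 4 fields: A evaluates
-- item[3] on every item and raises IndexError there (B raises too).
def Pre_ti_sort_verbs (items : List (List String)) : Prop :=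
  ∀ item ∈ items, 4 ≤ item.length
instance (items : List (List String)) : Decidable (Pre_ti_sort_verbs items) := by
  unfold Pre_ti_sort_verbs; infer_instance

def pvWitness_ti_sort_verbs : List (List String) := [["w", "x", "y", "IMP;2;SG;FEM"]]

def Spec_ti_sort_verbs (items : List (List String)) (out : List (List String)) : Prop :=
  out = ti_sort_verbs_alt items
instance (items : List (List String)) (out : List (List String)) :
    Decidable (Spec_ti_sort_verbs items out) := by unfold Spec_ti_sort_verbs; infer_instance

-- ===== CLAIM (what is proved, stated in full; the proofs are below) =====
def Claim_equal_ti_sort_verbs : Prop :=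
  ∀ (items : List (List String)), Dom_ti_sort_verbs items → Pre_ti_sort_verbs items →
    Spec_ti_sort_verbs items (ti_sort_verbs items)

-- ===== LEMMAS AND PROOFS =====

-- B's filter predicate and bucket index, as standalone functions
def pvPredB (item : List String) : Bool :=
  (pvTmB.findIdx? (fun t => PySem.Str.isIn t (PySem.List.pyGetD item 3 ""))).isSome

def pvBIdx (item : List String) : Nat :=
  match pvTmB.findIdx? (fun t => PySem.Str.isIn t (PySem.List.pyGetD item 3 "")) with
  | none => 0
  | some ti =>
    ti * pvSbB.length +
      (pvSbB.findIdx? (fun s => PySem.Str.isIn s (PySem.List.pyGetD item 3 ""))).getD 0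

lemma pv_insertBy_skip {α : Type} (before : α → α → Bool) (x : α) (l r : List α)
    (h : ∀ y ∈ l, before x y = false) :
    PySem.List.insertBy before x (l ++ r) = l ++ PySem.List.insertBy before x r := by
  induction l with
  | nil => simp
  | cons a t ih =>
    have ha := h a (by simp)
    cases htr : t ++ r with
    | nil => simp [PySem.List.insertBy, ha, ih (fun y hy => h y (by simp [hy]))]
    | cons b u => simp [PySem.List.insertBy, ha, ih (fun y hy => h y (by simp [hy]))]

lemma pv_insertBy_front {α : Type} (before : α → α → Bool) (x : α) (r : List α)
    (h : ∀ y ∈ r, before x y = true) :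
    PySem.List.insertBy before x r = x :: r := by
  cases r with
  | nil => simp [PySem.List.insertBy]
  | cons a t => simp [PySem.List.insertBy, h a (by simp)]

lemma pv_insert_blocks {α : Type} (key : α → Int) (x : α) (L : List Int)
    (hL : L.Pairwise (fun a b => b < a)) (hx : key x ∈ L) (p : List α) :
    PySem.List.insertBy (fun a b => decide (key b < key a)) x
      (L.flatMap (fun s => p.filter (fun y => decide (key y = s))))
    = L.flatMap (fun s => (p ++ [x]).filter (fun y => decide (key y = s))) := by
  induction L with
  | nil => simp at hx
  | cons s L' ih =>
    have hlt : ∀ t ∈ L', t < s := (List.pairwise_cons.mp hL).1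
    have hL' : L'.Pairwise (fun a b => b < a) := (List.pairwise_cons.mp hL).2
    simp only [List.flatMap_cons]
    have hskip0 : ∀ y ∈ p.filter (fun y => decide (key y = s)), key y = s := by
      intro y hy
      simpa using List.of_mem_filter hy
    by_cases hxs : key x = s
    · rw [pv_insertBy_skip _ _ _ _ (by
        intro y hy
        simp [hskip0 y hy, hxs])]
      rw [pv_insertBy_front _ _ _ (by
        intro y hy
        rcases List.mem_flatMap.mp hy with ⟨t, ht, hyt⟩
        have : key y = t := by simpa using List.of_mem_filter hyt
        simp [this, hxs]
        exact hlt t ht)]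
      have hblock : (p ++ [x]).filter (fun y => decide (key y = s)) =
          p.filter (fun y => decide (key y = s)) ++ [x] := by
        simp [List.filter_append, hxs]
      have hrest : L'.flatMap (fun t => (p ++ [x]).filter (fun y => decide (key y = t))) =
          L'.flatMap (fun t => p.filter (fun y => decide (key y = t))) := by
        rw [List.flatMap_def, List.flatMap_def]
        congr 1
        apply List.map_congr_left
        intro t ht
        have hxt : key x ≠ t := by
          have := hlt t ht; omega
        simp [List.filter_append, hxt]
      rw [hblock, hrest]
      simp
    · have hx' : key x ∈ L' := by
        rcases List.mem_cons.mp hx with h | h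
        · exact absurd h hxs
        · exact h
      have hxlt : key x < s := hlt _ hx'
      rw [pv_insertBy_skip _ _ _ _ (by
        intro y hy
        simp [hskip0 y hy]
        omega)]
      rw [ih hL' hx']
      have hblock : (p ++ [x]).filter (fun y => decide (key y = s)) =
          p.filter (fun y => decide (key y = s)) := by
        simp [List.filter_append, hxs]
      rw [hblock]

lemma pv_foldl_blocks {α : Type} (key : α → Int) (L : List Int)
    (hL : L.Pairwise (fun a b => b < a)) (fs : List α) (hfs : ∀ x ∈ fs, key x ∈ L) :
    fs.foldl (fun acc x => PySem.List.insertBy (fun a b => decide (key b < key a)) x acc) [] =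
      L.flatMap (fun s => fs.filter (fun y => decide (key y = s))) := by
  induction fs using List.reverseRecOn with
  | nil => simp
  | append_singleton p x ih =>
    rw [List.foldl_append]
    simp only [List.foldl_cons, List.foldl_nil]
    rw [ih (fun y hy => hfs y (by simp [hy]))]
    exact pv_insert_blocks key x L hL (hfs x (by simp)) p

lemma pv_bidx_lt (item : List String) (h : pvPredB item = true) : pvBIdx item < 40 := by
  unfold pvBIdx
  cases htm : pvTmB.findIdx? (fun t => PySem.Str.isIn t (PySem.List.pyGetD item 3 "")) with
  | none =>
    unfold pvPredB at h
    rw [htm] at h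
    simp at h
  | some ti =>
    have hti : ti < pvTmB.length := (List.findIdx?_eq_some_iff_findIdx_eq.mp htm).1
    have hti4 : ti < 4 := by simpa [pvTmB] using hti
    have hsi : (pvSbB.findIdx? (fun s => PySem.Str.isIn s (PySem.List.pyGetD item 3 ""))).getD 0 < 10 := by
      cases hsb : pvSbB.findIdx? (fun s => PySem.Str.isIn s (PySem.List.pyGetD item 3 "")) with
      | none => simp
      | some si =>
        have hs : si < pvSbB.length := (List.findIdx?_eq_some_iff_findIdx_eq.mp hsb).1
        simpa [pvSbB] using hs
    show ti * pvSbB.length +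
        (pvSbB.findIdx? (fun s => PySem.Str.isIn s (PySem.List.pyGetD item 3 ""))).getD 0 < 40
    have hlen : pvSbB.length = 10 := by decide
    rw [hlen]
    omega

lemma pv_loopTm (l : List String) (s : Int) (feat : String) :
    pvLoopTmA (PySem.List.enumerate l s) feat =
      match l.findIdx? (fun t => PySem.Str.isIn t feat) with
      | none => 0
      | some i => (s + (i : Int)) * (pvSbA.length : Int) := by
  induction l generalizing s with
  | nil => simp [PySem.List.enumerate, pvLoopTmA]
  | cons a t ih =>
    rw [PySem.List.enumerate_cons, List.findIdx?_cons]
    have ih' := ih (s + 1)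
    cases h : t.findIdx? (fun t => PySem.Str.isIn t feat) with
    | none =>
      by_cases hp : PySem.Chars.isIn a.toList feat.toList = true
      · simp [pvLoopTmA, hp]
      · rw [h] at ih'
        simp [pvLoopTmA, hp, ih']
    | some i =>
      by_cases hp : PySem.Chars.isIn a.toList feat.toList = true
      · simp [pvLoopTmA, hp]
      · rw [h] at ih'
        simp [pvLoopTmA, hp, ih']
        omega

lemma pv_loopSb (l : List String) (s : Int) (feat : String) :
    pvLoopSbA (PySem.List.enumerate l s) feat =
      match l.findIdx? (fun t => PySem.Str.isIn t feat) with
      | none => 0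
      | some i => s + (i : Int) := by
  induction l generalizing s with
  | nil => simp [PySem.List.enumerate, pvLoopSbA]
  | cons a t ih =>
    rw [PySem.List.enumerate_cons, List.findIdx?_cons]
    have ih' := ih (s + 1)
    cases h : t.findIdx? (fun t => PySem.Str.isIn t feat) with
    | none =>
      by_cases hp : PySem.Chars.isIn a.toList feat.toList = true
      · simp [pvLoopSbA, hp]
      · rw [h] at ih'
        simp [pvLoopSbA, hp, ih']
    | some i =>
      by_cases hp : PySem.Chars.isIn a.toList feat.toList = true
      · simp [pvLoopSbA, hp]
      · rw [h] at ih'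
        simp [pvLoopSbA, hp, ih']
        ring

lemma pv_sb_eq : pvSbA = pvSbB := by decide

lemma pv_order_eq (item : List String) (h : pvPredB item = true) :
    pvOrderFunc item = ((pvBIdx item : Nat) : Int) := by
  have hOF : pvOrderFunc item =
      pvLoopTmA (PySem.List.enumerate pvTmA) (PySem.List.pyGetD item 3 "") +
        pvLoopSbA (PySem.List.enumerate pvSbA) (PySem.List.pyGetD item 3 "") := rfl
  rw [hOF, pv_loopTm, pv_loopSb, pv_sb_eq]
  unfold pvBIdx
  cases htm : pvTmB.findIdx? (fun t => PySem.Str.isIn t (PySem.List.pyGetD item 3 "")) with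
  | none =>
    unfold pvPredB at h
    rw [htm] at h
    simp at h
  | some ti =>
    have htm' : pvTmA.findIdx? (fun t => PySem.Str.isIn t (PySem.List.pyGetD item 3 "")) =
        some ti := htm
    rw [htm']
    cases hsb : pvSbB.findIdx? (fun s => PySem.Str.isIn s (PySem.List.pyGetD item 3 "")) with
    | none => simp [pvSbB]
    | some si => simp [pvSbB]

lemma pv_pred_eq (item : List String) :
    pvTmA.any (fun t => PySem.Str.isIn t (PySem.List.pyGetD item 3 "")) = pvPredB item := by
  unfold pvPredB
  rw [List.findIdx?_isSome]
  rfl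

lemma pv_buckets (n : Nat) (hn : ∀ x, pvPredB x = true → pvBIdx x < n)
    (items : List (List String)) :
    items.foldl pvBucketStep (List.replicate n []) =
      (List.range n).map (fun s => items.filter (fun y => pvPredB y && (pvBIdx y == s))) := by
  induction items using List.reverseRecOn with
  | nil =>
    apply List.ext_getElem (by simp)
    intro i h1 h2
    simp
  | append_singleton p x ih =>
    rw [List.foldl_append]
    simp only [List.foldl_cons, List.foldl_nil]
    rw [ih]
    have hstep : ∀ bs : List (List (List String)), pvBucketStep bs x =
        match pvTmB.findIdx? (fun t => PySem.Str.isIn t (PySem.List.pyGetD x 3 "")) with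
        | none => bs
        | some ti =>
          bs.set
            (ti * pvSbB.length +
              (pvSbB.findIdx? (fun s => PySem.Str.isIn s (PySem.List.pyGetD x 3 ""))).getD 0)
            (bs.getD
              (ti * pvSbB.length +
                (pvSbB.findIdx? (fun s => PySem.Str.isIn s (PySem.List.pyGetD x 3 ""))).getD 0)
              [] ++ [x]) := fun bs => rfl
    rw [hstep]
    cases htm : pvTmB.findIdx? (fun t => PySem.Str.isIn t (PySem.List.pyGetD x 3 "")) with
    | none =>
      have hpx : pvPredB x = false := by
        unfold pvPredB
        rw [htm]
        rfl
      simp only []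
      apply List.map_congr_left
      intro s _
      simp [List.filter_append, hpx]
    | some ti =>
      have hpx : pvPredB x = true := by
        unfold pvPredB
        rw [htm]
        rfl
      have hk : ti * pvSbB.length +
          (pvSbB.findIdx? (fun s => PySem.Str.isIn s (PySem.List.pyGetD x 3 ""))).getD 0 =
          pvBIdx x := by
        unfold pvBIdx
        rw [htm]
      simp only []
      rw [hk]
      have hkn : pvBIdx x < n := hn x hpx
      have hgetD : ((List.range n).map
          (fun s => p.filter (fun y => pvPredB y && (pvBIdx y == s)))).getD (pvBIdx x) [] =
          p.filter (fun y => pvPredB y && (pvBIdx y == pvBIdx x)) := by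
        rw [List.getD_eq_getElem?_getD]
        rw [List.getElem?_eq_getElem (by simpa using hkn)]
        simp
      rw [hgetD]
      apply List.ext_getElem (by simp)
      intro i h1 h2
      have hin : i < n := by simpa using h2
      simp only [List.getElem_set, List.getElem_map, List.getElem_range]
      by_cases hik : pvBIdx x = i
      · simp [hik, List.filter_append, hpx]
      · simp [hik, List.filter_append, hpx]

-- ===== VERDICT (by name: the statement is the Claim_ definition above) =====
theorem ti_sort_verbs_spec : Claim_equal_ti_sort_verbs := by
  intro items _ _
  unfold Spec_ti_sort_verbs ti_sort_verbs ti_sort_verbs_alt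
  simp only []
  have hrepl : (pvTmB.length - 1) * pvSbB.length + pvSbB.length = 40 := by decide
  rw [hrepl]
  rw [pv_buckets 40 pv_bidx_lt items]
  rw [← List.map_reverse, ← List.flatMap_def]
  rw [PySem.List.sorted_rev_eq_foldl_insertBy]
  have hL : (((List.range 40).reverse.map (fun k : Nat => (k : Int)))).Pairwise
      (fun a b => b < a) := by decide
  rw [pv_foldl_blocks pvOrderFunc _ hL _ (by
    intro x hx
    have hpx : pvPredB x = true := by
      have := List.of_mem_filter hx
      rwa [pv_pred_eq] at this
    simp only [List.mem_map, List.mem_reverse, List.mem_range]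
    exact ⟨pvBIdx x, pv_bidx_lt x hpx, (pv_order_eq x hpx).symm⟩)]
  rw [List.flatMap_map]
  have hpt : ∀ k : Nat,
      (items.filter (fun item => pvTmA.any (fun t => PySem.Str.isIn t (PySem.List.pyGetD item 3 "")))).filter
        (fun y => decide (pvOrderFunc y = (k : Int))) =
      items.filter (fun y => pvPredB y && (pvBIdx y == k)) := by
    intro k
    rw [List.filter_filter]
    apply List.filter_congr
    intro y _
    rw [pv_pred_eq]
    by_cases hy : pvPredB y = true
    · have ho := pv_order_eq y hy
      by_cases hbk : pvBIdx y = k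
      · simp [hy, ho, hbk]
      · simp [hy, ho, hbk]
    · have hy' : pvPredB y = false := by simpa using hy
      simp [hy']
  simp only [hpt]
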